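-- pv_equiv track=rewrite | github.com/liupengsay/PyIsTheBestLang | src/greed/longest_increasing_subsequence/problem.py | lc_3288
-- ===== SOURCE A (Python) =====
-- import bisect
-- from typing import List
--
-- def lc_3288(coordinates: List[List[int]], k: int) -> int:
--     """
--     url: https://leetcode.cn/problems/length-of-the-longest-increasing-path/
--     tag: lis|partial_order|classical
--     """
--     kx, ky = coordinates[k]
--     coordinates.sort(key=lambda it: (it[0], -it[1]))
--     dp = []
--     for x, y in coordinates:
--         if (x < kx and y < ky) or (x > kx and y > ky):
--             i = bisect.bisect_left(dp, y)
--             if 0 <= i < len(dp):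
--                 dp[i] = y
--             else:
--                 dp.append(y)
--     return len(dp) + 1
-- ===== SOURCE B (Python) =====
-- import bisect
-- from typing import List
--
--
-- def _lis_len(ys):
--     """Length of a longest strictly increasing subsequence (patience tails)."""
--     tails = []
--     for y in ys:
--         i = bisect.bisect_left(tails, y)
--         if i == len(tails):
--             tails.append(y)
--         else:
--             tails[i] = y
--     return len(tails)
--
--
-- def lc_3288(coordinates: List[List[int]], k: int) -> int:
--     kx, ky = coordinates[k]
--     coordinates.sort(key=lambda it: (it[0], -it[1]))
--     below = [y for x, y in coordinates if x < kx and y < ky]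
--     above = [y for x, y in coordinates if x > kx and y > ky]
--     return _lis_len(below) + _lis_len(above) + 1
-- ===== Notes on version B (the rewrite author's own statement) =====
-- stated objective: alternative
-- what changed: Instead of one shared patience-sorting pass whose tails list silently mixes the below-left and above-right points, B partitions the sorted points into the two independent quadrant chains and runs a separate LIS pass on each, summing the two lengths.
import Mathlib
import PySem

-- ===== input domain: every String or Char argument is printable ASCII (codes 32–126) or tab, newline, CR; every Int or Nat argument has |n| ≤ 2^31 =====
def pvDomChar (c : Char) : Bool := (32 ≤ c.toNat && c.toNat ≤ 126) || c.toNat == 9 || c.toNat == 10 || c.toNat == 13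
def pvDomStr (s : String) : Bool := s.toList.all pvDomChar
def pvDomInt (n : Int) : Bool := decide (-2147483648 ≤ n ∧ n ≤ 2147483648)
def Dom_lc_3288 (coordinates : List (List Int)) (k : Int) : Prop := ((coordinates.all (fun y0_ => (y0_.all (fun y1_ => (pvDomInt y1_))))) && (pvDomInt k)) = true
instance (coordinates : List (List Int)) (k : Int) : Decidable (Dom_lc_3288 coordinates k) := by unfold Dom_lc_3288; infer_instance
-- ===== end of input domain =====

-- B replaces A's single shared patience pass over both quadrants by two independent
-- LIS passes, one per quadrant (objective: alternative decomposition, same cost).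
-- A sorts `coordinates` in place; B performs the same in-place sort, so the side
-- effect is identical; the theorems below are about the return value.

-- ===== PORT A =====
-- the body of A's loop for an accepted point: bisect_left, then overwrite or append
def pvStepA (dp : List Int) (y : Int) : List Int :=
  let i := PySem.List.bisectLeft dp y
  if i < dp.length then dp.set i y else dp ++ [y]

def lc_3288 (coordinates : List (List Int)) (k : Int) : Int :=
  match PySem.List.pyGet? coordinates k with
  | none => 0   -- unreachable under Pre_ (Python raises IndexError)
  | some row =>
    -- kx, ky = coordinates[k]; rows have length 2 under Pre_, where getD is exact
    let kx := row.getD 0 0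
    let ky := row.getD 1 0
    let cs := PySem.List.sorted2 coordinates (fun it => it.getD 0 0) (fun it => -(it.getD 1 0))
    let dp := cs.foldl (fun dp p =>
      let x := p.getD 0 0
      let y := p.getD 1 0
      if (decide (x < kx) && decide (y < ky)) || (decide (kx < x) && decide (ky < y))
      then pvStepA dp y else dp) []
    (dp.length : Int) + 1

-- ===== PORT B =====
-- _lis_len of Source B: patience tails over a plain list of ints
def pvLisLen (ys : List Int) : Int :=
  (ys.foldl (fun tails y =>
    let i := PySem.List.bisectLeft tails y
    if i = tails.length then tails ++ [y] else tails.set i y) []).length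

def lc_3288_alt (coordinates : List (List Int)) (k : Int) : Int :=
  match PySem.List.pyGet? coordinates k with
  | none => 0   -- unreachable under Pre_ (Python raises IndexError)
  | some row =>
    let kx := row.getD 0 0
    let ky := row.getD 1 0
    let cs := PySem.List.sorted2 coordinates (fun it => it.getD 0 0) (fun it => -(it.getD 1 0))
    let below := (cs.filter (fun p => decide (p.getD 0 0 < kx) && decide (p.getD 1 0 < ky))).map (fun p => p.getD 1 0)
    let above := (cs.filter (fun p => decide (kx < p.getD 0 0) && decide (ky < p.getD 1 0))).map (fun p => p.getD 1 0)
    pvLisLen below + pvLisLen above + 1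

-- ===== PRECONDITION & SPEC =====
-- Pre_ excludes exactly the inputs where Python A raises: an invalid index k
-- (IndexError) or a row that is not an [x, y] pair (ValueError on unpacking).
def Pre_lc_3288 (coordinates : List (List Int)) (k : Int) : Prop :=
  (PySem.List.pyGet? coordinates k).isSome = true ∧ ∀ row ∈ coordinates, row.length = 2
instance (coordinates : List (List Int)) (k : Int) : Decidable (Pre_lc_3288 coordinates k) := by
  unfold Pre_lc_3288; infer_instance

def pvWitness_lc_3288 : List (List Int) × Int := ([[0, 0], [1, 1], [3, 2]], 0)

def Spec_lc_3288 (coordinates : List (List Int)) (k : Int) (out : Int) : Prop := out = lc_3288_alt coordinates k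
instance (coordinates : List (List Int)) (k : Int) (out : Int) : Decidable (Spec_lc_3288 coordinates k out) := by unfold Spec_lc_3288; infer_instance

-- ===== CLAIM (what is proved, stated in full; the proofs are below) =====
def Claim_equal_lc_3288 : Prop := ∀ (coordinates : List (List Int)) (k : Int), Dom_lc_3288 coordinates k → Pre_lc_3288 coordinates k → Spec_lc_3288 coordinates k (lc_3288 coordinates k)

-- ===== LEMMAS AND PROOFS =====

-- B's loop body, named for the proofs
def pvStepB (tails : List Int) (y : Int) : List Int :=
  let i := PySem.List.bisectLeft tails y
  if i = tails.length then tails ++ [y] else tails.set i y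

theorem pvLisLen_eq (ys : List Int) : pvLisLen ys = ((ys.foldl pvStepB []).length : Int) := rfl

theorem pv_bl_le (dp : List Int) (y : Int) (h : dp.Pairwise (· ≤ ·)) :
    PySem.List.bisectLeft dp y ≤ dp.length := (PySem.List.bisectLeft_spec dp y h).1

theorem pv_stepA_eq_stepB (dp : List Int) (y : Int) (h : dp.Pairwise (· ≤ ·)) :
    pvStepA dp y = pvStepB dp y := by
  have hle := pv_bl_le dp y h
  unfold pvStepA pvStepB
  by_cases hlt : PySem.List.bisectLeft dp y < dp.length
  · simp [hlt, Nat.ne_of_lt hlt]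
  · have : PySem.List.bisectLeft dp y = dp.length := by omega
    simp [this]

theorem pv_sorted_stepB (dp : List Int) (y : Int) (h : dp.Pairwise (· ≤ ·)) :
    (pvStepB dp y).Pairwise (· ≤ ·) := by
  obtain ⟨h1, h2, h3⟩ := PySem.List.bisectLeft_spec dp y h
  unfold pvStepB
  by_cases hc : PySem.List.bisectLeft dp y = dp.length
  · simp only [hc, if_pos]
    refine List.pairwise_append.mpr ⟨h, List.pairwise_singleton _ _, ?_⟩
    intro a ha b hb
    obtain ⟨j, hj, rfl⟩ := List.getElem_of_mem ha
    simp at hb; subst hb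
    exact le_of_lt (h2 j hj (by omega))
  · simp only [if_neg hc]
    have hlt : PySem.List.bisectLeft dp y < dp.length := lt_of_le_of_ne h1 hc
    rw [List.pairwise_iff_getElem] at h ⊢
    intro p q hp hq hpq
    simp only [List.length_set] at hp hq
    rw [List.getElem_set, List.getElem_set]
    split_ifs with e1 e2 e2
    · omega
    · exact h3 q hq (by omega)
    · exact le_of_lt (h2 p hp (by omega))
    · exact h p q hp hq hpq

theorem pv_mem_stepB (dp : List Int) (y z : Int) (hz : z ∈ pvStepB dp y) :
    z ∈ dp ∨ z = y := by
  unfold pvStepB at hz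
  by_cases hc : PySem.List.bisectLeft dp y = dp.length
  · simp [hc] at hz
    rcases hz with hz | hz
    · exact Or.inl hz
    · exact Or.inr hz
  · simp only [if_neg hc] at hz
    exact List.mem_or_eq_of_mem_set hz

theorem pv_bisectLeft_unique (dp : List Int) (y : Int) (n : Nat)
    (h : dp.Pairwise (· ≤ ·)) (hn : n ≤ dp.length)
    (hlo : ∀ (j : Nat) (hj : j < dp.length), j < n → dp[j] < y)
    (hhi : ∀ (j : Nat) (hj : j < dp.length), n ≤ j → y ≤ dp[j]) :
    PySem.List.bisectLeft dp y = n := by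
  obtain ⟨s1, s2, s3⟩ := PySem.List.bisectLeft_spec dp y h
  rcases Nat.lt_trichotomy (PySem.List.bisectLeft dp y) n with hl | he | hg
  · have hj : PySem.List.bisectLeft dp y < dp.length := by omega
    have := hlo _ hj hl
    have := s3 _ hj (le_refl _)
    omega
  · exact he
  · have hj : n < dp.length := by omega
    have := s2 _ hj hg
    have := hhi _ hj (le_refl _)
    omega

theorem pv_step_split (d1 d2 : List Int) (ky y : Int)
    (h1 : d1.Pairwise (· ≤ ·)) (h2 : d2.Pairwise (· ≤ ·))
    (hb : ∀ z ∈ d1, z < ky) (ha : ∀ z ∈ d2, ky < z) (hy : ky < y) :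
    pvStepA (d1 ++ d2) y = d1 ++ pvStepB d2 y := by
  have h12 : (d1 ++ d2).Pairwise (· ≤ ·) :=
    List.pairwise_append.mpr ⟨h1, h2, fun a ha' b hb' => le_of_lt (lt_trans (hb a ha') (ha b hb'))⟩
  obtain ⟨s1, s2, s3⟩ := PySem.List.bisectLeft_spec d2 y h2
  have hbl : PySem.List.bisectLeft (d1 ++ d2) y = d1.length + PySem.List.bisectLeft d2 y := by
    apply pv_bisectLeft_unique _ _ _ h12 (by simp; omega)
    · intro j hj hjn
      rw [List.getElem_append]
      split_ifs with hlt
      · exact lt_trans (hb _ (List.getElem_mem hlt)) hy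
      · exact s2 _ (by simp at hj; omega) (by omega)
    · intro j hj hjn
      rw [List.getElem_append]
      split_ifs with hlt
      · omega
      · exact s3 _ (by simp at hj; omega) (by omega)
  unfold pvStepA pvStepB
  simp only [hbl]
  by_cases hc : PySem.List.bisectLeft d2 y = d2.length
  · simp [hc, List.append_assoc]
  · have hlt : PySem.List.bisectLeft d2 y < d2.length := lt_of_le_of_ne s1 hc
    have : d1.length + PySem.List.bisectLeft d2 y < (d1 ++ d2).length := by simp; omega
    simp only [if_pos this, if_neg hc, List.set_append]
    split_ifs with h'
    · omega
    · congr 1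
      congr 1
      omega

theorem pv_fold_stepB_inv (Q : Int → Prop) (ys : List Int) (hys : ∀ y ∈ ys, Q y) :
    ∀ acc : List Int, acc.Pairwise (· ≤ ·) → (∀ z ∈ acc, Q z) →
      (ys.foldl pvStepB acc).Pairwise (· ≤ ·) ∧ ∀ z ∈ ys.foldl pvStepB acc, Q z := by
  induction ys with
  | nil => intro acc h hq; exact ⟨h, hq⟩
  | cons y t ih =>
    intro acc h hq
    simp only [List.foldl_cons]
    refine ih (fun z hz => hys z (List.mem_cons_of_mem _ hz)) _ (pv_sorted_stepB acc y h) ?_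
    intro z hz
    rcases pv_mem_stepB acc y z hz with hz | rfl
    · exact hq z hz
    · exact hys z List.mem_cons_self

theorem pv_fold_A_eq_B (ys : List Int) :
    ∀ acc : List Int, acc.Pairwise (· ≤ ·) → ys.foldl pvStepA acc = ys.foldl pvStepB acc := by
  induction ys with
  | nil => intro acc _; rfl
  | cons y t ih =>
    intro acc h
    simp only [List.foldl_cons]
    rw [pv_stepA_eq_stepB acc y h]
    exact ih _ (pv_sorted_stepB acc y h)

theorem pv_fold_split (ky : Int) (ays : List Int) (hays : ∀ y ∈ ays, ky < y)
    (d1 : List Int) (h1 : d1.Pairwise (· ≤ ·)) (hb : ∀ z ∈ d1, z < ky) :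
    ∀ d2 : List Int, d2.Pairwise (· ≤ ·) → (∀ z ∈ d2, ky < z) →
      ays.foldl pvStepA (d1 ++ d2) = d1 ++ ays.foldl pvStepB d2 := by
  induction ays with
  | nil => intro d2 _ _; rfl
  | cons y t ih =>
    intro d2 h2 ha
    simp only [List.foldl_cons]
    rw [pv_step_split d1 d2 ky y h1 h2 hb ha (hays y List.mem_cons_self)]
    refine ih (fun z hz => hays z (List.mem_cons_of_mem _ hz)) _ (pv_sorted_stepB d2 y h2) ?_
    intro z hz
    rcases pv_mem_stepB d2 y z hz with hz | hzy
    · exact ha z hz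
    · exact hzy ▸ hays y List.mem_cons_self

-- lexicographic ≤ on the sort key (it[0], -it[1])
def pvLexLe (kx1 kx2 : List Int → Int) (a b : List Int) : Prop :=
  kx1 a < kx1 b ∨ (kx1 a = kx1 b ∧ kx2 a ≤ kx2 b)

theorem pv_insertBy_pairwise {α : Type} (R : α → α → Prop) (before : α → α → Bool)
    (htr : ∀ a b c, R a b → R b c → R a c)
    (ht : ∀ a b, before a b = true → R a b)
    (hf : ∀ a b, before a b = false → R b a)
    (x : α) (ys : List α) (h : ys.Pairwise R) :
    (PySem.List.insertBy before x ys).Pairwise R := by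
  induction ys with
  | nil => simp [PySem.List.insertBy]
  | cons y t ih =>
    rw [PySem.List.insertBy.eq_2]
    rcases List.pairwise_cons.mp h with ⟨hy, ht'⟩
    by_cases hc : before x y = true
    · simp only [if_pos hc]
      refine List.pairwise_cons.mpr ⟨?_, h⟩
      intro b hb
      rcases List.mem_cons.mp hb with rfl | hb
      · exact ht _ _ hc
      · exact htr _ _ _ (ht _ _ hc) (hy b hb)
    · simp only [if_neg hc]
      refine List.pairwise_cons.mpr ⟨?_, ih ht'⟩
      intro b hb
      rcases (PySem.List.insertBy_mem_iff _ _ _ _).mp hb with rfl | hb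
      · exact hf _ _ (Bool.not_eq_true _ ▸ hc)
      · exact hy b hb

theorem pv_sorted2_pairwise (xs : List (List Int)) (k1 k2 : List Int → Int) :
    (PySem.List.sorted2 xs k1 k2).Pairwise (pvLexLe k1 k2) := by
  have htr : ∀ a b c, pvLexLe k1 k2 a b → pvLexLe k1 k2 b c → pvLexLe k1 k2 a c := by
    intro a b c hab hbc
    unfold pvLexLe at *
    omega
  have ht : ∀ a b, (decide (k1 a < k1 b) || (!decide (k1 b < k1 a) && decide (k2 a < k2 b))) = true →
      pvLexLe k1 k2 a b := by
    intro a b h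
    simp only [Bool.or_eq_true, Bool.and_eq_true, Bool.not_eq_true', decide_eq_true_eq,
      decide_eq_false_iff_not] at h
    unfold pvLexLe
    rcases h with h | ⟨h, h'⟩
    · exact Or.inl h
    · rcases lt_or_ge (k1 a) (k1 b) with g | g
      · exact Or.inl g
      · exact Or.inr ⟨by omega, le_of_lt h'⟩
  have hf : ∀ a b, (decide (k1 a < k1 b) || (!decide (k1 b < k1 a) && decide (k2 a < k2 b))) = false →
      pvLexLe k1 k2 b a := by
    intro a b h
    simp only [Bool.or_eq_false_iff, Bool.and_eq_false_iff, Bool.not_eq_false',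
      decide_eq_true_eq, decide_eq_false_iff_not] at h
    unfold pvLexLe
    rcases h with ⟨h1, h2 | h2⟩
    · exact Or.inl h2
    · rcases lt_or_ge (k1 b) (k1 a) with g | g
      · exact Or.inl g
      · exact Or.inr ⟨by omega, by omega⟩
  show List.Pairwise _ (List.foldl (fun acc x => PySem.List.insertBy _ x acc) [] xs)
  generalize hacc : ([] : List (List Int)) = acc
  have hP : acc.Pairwise (pvLexLe k1 k2) := hacc ▸ List.Pairwise.nil
  clear hacc
  induction xs generalizing acc with
  | nil => exact hP
  | cons x t ih =>
    simp only [List.foldl_cons]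
    exact ih _ (pv_insertBy_pairwise _ _ htr ht hf x acc hP)

-- filter splits over a disjunction when no Q-element precedes a P-element
theorem pv_filter_or_append {α : Type} (P Q : α → Bool) (l : List α)
    (hd : ∀ a, ¬(P a = true ∧ Q a = true))
    (hp : l.Pairwise (fun a b => Q a = true → P b = false)) :
    l.filter (fun a => P a || Q a) = l.filter P ++ l.filter Q := by
  induction l with
  | nil => rfl
  | cons a t ih =>
    rcases List.pairwise_cons.mp hp with ⟨ha, ht⟩
    simp only [List.filter_cons]
    by_cases hPa : P a = true
    · have hQa : Q a = false := by
        cases hq : Q a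
        · rfl
        · exact absurd ⟨hPa, hq⟩ (hd a)
      simp [hPa, hQa, ih ht]
    · by_cases hQa : Q a = true
      · have hPt : t.filter P = [] := List.filter_eq_nil_iff.mpr (fun b hb => by
          simp [ha b hb hQa])
        simp [hPa, hQa, ih ht, hPt]
      · simp [hPa, hQa, ih ht]

theorem pv_core (coordinates : List (List Int)) (row : List Int) :
    (((PySem.List.sorted2 coordinates (fun it => it.getD 0 0) (fun it => -(it.getD 1 0))).foldl
        (fun dp p =>
          if (decide (p.getD 0 0 < row.getD 0 0) && decide (p.getD 1 0 < row.getD 1 0)) ||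
             (decide (row.getD 0 0 < p.getD 0 0) && decide (row.getD 1 0 < p.getD 1 0))
          then pvStepA dp (p.getD 1 0) else dp) []).length : Int) + 1 =
    pvLisLen (((PySem.List.sorted2 coordinates (fun it => it.getD 0 0) (fun it => -(it.getD 1 0))).filter
        (fun p => decide (p.getD 0 0 < row.getD 0 0) && decide (p.getD 1 0 < row.getD 1 0))).map (fun p => p.getD 1 0)) +
    pvLisLen (((PySem.List.sorted2 coordinates (fun it => it.getD 0 0) (fun it => -(it.getD 1 0))).filter
        (fun p => decide (row.getD 0 0 < p.getD 0 0) && decide (row.getD 1 0 < p.getD 1 0))).map (fun p => p.getD 1 0)) + 1 := by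
  set kx := row.getD 0 0 with hkx
  set ky := row.getD 1 0 with hky
  set cs := PySem.List.sorted2 coordinates (fun it => it.getD 0 0) (fun it => -(it.getD 1 0)) with hcs
  set P : List Int → Bool := fun p => decide (p.getD 0 0 < kx) && decide (p.getD 1 0 < ky) with hP
  set Q : List Int → Bool := fun p => decide (kx < p.getD 0 0) && decide (ky < p.getD 1 0) with hQ
  set f : List Int → Int := fun p => p.getD 1 0 with hf
  -- A's fold-with-if is the fold of pvStepA over the filtered, mapped list
  have hA : (cs.foldl (fun dp p =>
      if (decide (p.getD 0 0 < kx) && decide (p.getD 1 0 < ky)) ||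
         (decide (kx < p.getD 0 0) && decide (ky < p.getD 1 0))
      then pvStepA dp (p.getD 1 0) else dp) []) =
      ((cs.filter (fun p => P p || Q p)).map f).foldl pvStepA [] := by
    rw [List.foldl_map, List.foldl_filter]
  -- the filter splits: in cs, sorted by (x, -y), every below-point precedes every above-point
  have hsplit : cs.filter (fun p => P p || Q p) = cs.filter P ++ cs.filter Q := by
    apply pv_filter_or_append
    · intro a ⟨h1, h2⟩
      simp [hP] at h1
      simp [hQ] at h2
      omega
    · have hpw := pv_sorted2_pairwise coordinates (fun it => it.getD 0 0) (fun it => -(it.getD 1 0))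
      rw [← hcs] at hpw
      refine hpw.imp ?_
      intro a b hab hQa
      simp only [pvLexLe] at hab
      simp only [hQ, Bool.and_eq_true, decide_eq_true_eq] at hQa
      simp only [hP, Bool.and_eq_false_iff, decide_eq_false_iff_not]
      left
      omega
  set bys := (cs.filter P).map f with hbys
  set ays := (cs.filter Q).map f with hays
  have hbylt : ∀ y ∈ bys, y < ky := by
    intro y hy
    rw [hbys] at hy
    obtain ⟨p, hp, rfl⟩ := List.mem_map.mp hy
    have := (List.mem_filter.mp hp).2
    simp [hP] at this
    exact this.2
  have haygt : ∀ y ∈ ays, ky < y := by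
    intro y hy
    rw [hays] at hy
    obtain ⟨p, hp, rfl⟩ := List.mem_map.mp hy
    have := (List.mem_filter.mp hp).2
    simp [hQ] at this
    exact this.2
  have hinv := pv_fold_stepB_inv (· < ky) bys hbylt [] List.Pairwise.nil (by simp)
  set d1 := bys.foldl pvStepB [] with hd1
  have hchain : ((cs.filter (fun p => P p || Q p)).map f).foldl pvStepA [] =
      d1 ++ ays.foldl pvStepB [] := by
    rw [hsplit, List.map_append, List.foldl_append, ← hbys, ← hays]
    rw [pv_fold_A_eq_B bys [] List.Pairwise.nil, ← hd1]
    have := pv_fold_split ky ays haygt d1 hinv.1 hinv.2 [] List.Pairwise.nil (by simp)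
    rw [List.append_nil] at this
    exact this
  rw [hA, hchain, pvLisLen_eq, pvLisLen_eq]
  rw [List.length_append, ← hd1]
  push_cast
  ring

theorem pv_main (coordinates : List (List Int)) (k : Int) :
    lc_3288 coordinates k = lc_3288_alt coordinates k := by
  unfold lc_3288 lc_3288_alt
  cases hget : PySem.List.pyGet? coordinates k with
  | none => rfl
  | some row => exact pv_core coordinates row

-- ===== VERDICT (by name: the statement is the Claim_ definition above) =====
theorem lc_3288_spec : Claim_equal_lc_3288 := by
  intro coordinates k _ _
  exact pv_main coordinates k
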